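-- pv_equiv track=rewrite | github.com/FabianVald/CompetitiveProgramming-notes | Challenges/AlmostIdentityPermutations.py | contador
-- ===== SOURCE A (Python) =====
-- def desarreglo(d):
--     if d == 0:
--         return 1
--     elif d == 1:
--         return 0
--     desarreglo_prev1 = 0
--     desarreglo_prev2 = 1
--     for i in range(2, d + 1):
--         actual = (i - 1) * (desarreglo_prev1 + desarreglo_prev2)
--         desarreglo_prev2 = desarreglo_prev1
--         desarreglo_prev1 = actual
--     return desarreglo_prev1
--
-- def contador(n, k):
--     conteo = 0
--     for d in range(k + 1):
--         comb = 1
--         for i in range(d):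
--             comb *= (n - i)
--             comb //= (i + 1)
--
--         desarreglos_d = desarreglo(d)
--         conteo += comb * desarreglos_d
--     return conteo
-- ===== SOURCE B (Python) =====
-- def contador(n, k):
--     # Single incremental pass: running binomial C(n,d) and one-term
--     # derangement recurrence D(d) = d*D(d-1) + (-1)^d, no helper, no inner loop.
--     if k < 0:
--         return 0
--     conteo = 1  # d = 0 term: C(n,0) * D(0) = 1
--     comb = 1
--     der = 1
--     sign = 1
--     for d in range(1, k + 1):
--         comb = comb * (n - d + 1) // d
--         sign = -sign
--         der = d * der + sign
--         conteo += comb * der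
--     return conteo
-- ===== Notes on version B (the rewrite author's own statement) =====
-- stated objective: faster
-- what changed: Replaced the per-d from-scratch binomial inner loop and the separate two-term derangement helper loop by one single pass that maintains a running binomial and a running derangement via the one-term recurrence D(d)=d*D(d-1)+(-1)^d.
import Mathlib
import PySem

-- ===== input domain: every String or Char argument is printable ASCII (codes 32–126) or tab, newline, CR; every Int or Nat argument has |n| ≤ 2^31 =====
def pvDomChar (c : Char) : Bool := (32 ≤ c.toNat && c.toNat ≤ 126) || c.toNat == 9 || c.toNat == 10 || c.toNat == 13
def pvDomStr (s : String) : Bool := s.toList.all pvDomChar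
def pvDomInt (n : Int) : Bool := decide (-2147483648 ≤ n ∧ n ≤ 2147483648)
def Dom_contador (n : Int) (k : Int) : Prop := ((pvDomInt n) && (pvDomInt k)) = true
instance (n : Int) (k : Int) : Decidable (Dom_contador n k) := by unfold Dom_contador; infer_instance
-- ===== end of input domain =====

-- B replaces A's per-d binomial inner loop and separate derangement helper by one
-- incremental pass (running binomial + one-term derangement recurrence): O(k) vs O(k^2).

-- ===== PORT A =====
def desarregloA (d : Int) : Int :=
  if d = 0 then 1
  else if d = 1 then 0
  else
    let st := (PySem.List.pyRange 2 (d + 1) 1).foldl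
      (fun (s : Int × Int) i => ((i - 1) * (s.1 + s.2), s.1)) (0, 1)
    st.1

def contador (n : Int) (k : Int) : Int :=
  (PySem.List.pyRange 0 (k + 1) 1).foldl
    (fun conteo d =>
      let comb := (PySem.List.pyRange 0 d 1).foldl
        (fun c i => PySem.Int.floordiv (c * (n - i)) (i + 1)) 1
      conteo + comb * desarregloA d) 0

-- ===== PORT B =====
def contador_alt (n : Int) (k : Int) : Int :=
  if k < 0 then 0
  else
    let st := (PySem.List.pyRange 1 (k + 1) 1).foldl
      (fun (s : Int × Int × Int × Int) d =>
        let comb := PySem.Int.floordiv (s.2.1 * (n - d + 1)) d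
        let sign := -s.2.2.2
        let der := d * s.2.2.1 + sign
        (s.1 + comb * der, comb, der, sign)) (1, 1, 1, 1)
    st.1

-- ===== PRECONDITION & SPEC =====
def Spec_contador (n : Int) (k : Int) (out : Int) : Prop := out = contador_alt n k
instance (n : Int) (k : Int) (out : Int) : Decidable (Spec_contador n k out) := by unfold Spec_contador; infer_instance

-- ===== CLAIM (what is proved, stated in full; the proofs are below) =====
def Claim_equal_contador : Prop := ∀ (n : Int) (k : Int), Dom_contador n k → Spec_contador n k (contador n k)

-- ===== LEMMAS AND PROOFS =====

-- proof-side mirrors of the two running quantities and the partial sum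
def pvE : Nat → Int
  | 0 => 1
  | d + 1 => ((d : Int) + 1) * pvE d + (-1) ^ (d + 1)

def pvC (n : Int) : Nat → Int
  | 0 => 1
  | d + 1 => PySem.Int.floordiv (pvC n d * (n - (d : Int))) ((d : Int) + 1)

def pvF (n : Int) : Nat → Int
  | 0 => 1
  | j + 1 => pvF n j + pvC n (j + 1) * pvE (j + 1)

theorem pvE_two_term (t : Nat) :
    pvE (t + 2) = ((t : Int) + 1) * (pvE (t + 1) + pvE t) := by
  simp only [pvE, pow_succ]
  push_cast
  ring

theorem combA_eq (n : Int) (j : Nat) :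
    (PySem.List.pyRange 0 (j : Int) 1).foldl
      (fun c i => PySem.Int.floordiv (c * (n - i)) (i + 1)) 1 = pvC n j := by
  induction j with
  | zero => simp [PySem.List.pyRange_one_eq_nil, pvC]
  | succ m ih =>
    have h : ((m : Int) + 1) = ((m + 1 : Nat) : Int) := by push_cast; ring
    rw [show ((m + 1 : Nat) : Int) = (m : Int) + 1 by push_cast; ring,
        PySem.List.pyRange_one_succ_right (by positivity), List.foldl_append, ih]
    simp [pvC]

theorem desarregloA_loop (m : Nat) :
    (PySem.List.pyRange 2 ((m : Int) + 2) 1).foldl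
      (fun (s : Int × Int) i => ((i - 1) * (s.1 + s.2), s.1)) (0, 1)
      = (pvE (m + 1), pvE m) := by
  induction m with
  | zero => simp [PySem.List.pyRange_one_eq_nil, pvE]
  | succ t ih =>
    rw [show ((t + 1 : Nat) : Int) + 2 = ((t : Int) + 2) + 1 by push_cast; ring,
        PySem.List.pyRange_one_succ_right (by omega), List.foldl_append, ih]
    simp only [List.foldl_cons, List.foldl_nil]
    have h2 : ((t : Int) + 2 - 1) * (pvE (t + 1) + pvE t) = pvE (t + 2) := by
      rw [pvE_two_term t]; ring
    rw [h2]

theorem desarregloA_eq (j : Nat) : desarregloA (j : Int) = pvE j := by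
  match j with
  | 0 => simp [desarregloA, pvE]
  | 1 => norm_num [desarregloA, pvE]
  | m + 2 =>
    unfold desarregloA
    rw [if_neg (by push_cast; omega), if_neg (by push_cast; omega)]
    have h : ((m + 2 : Nat) : Int) + 1 = ((m + 1 : Nat) : Int) + 2 := by push_cast; ring
    rw [h, desarregloA_loop (m + 1)]

theorem contadorA_eq (n : Int) (j : Nat) : contador n ((j : Nat) : Int) = pvF n j := by
  induction j with
  | zero =>
    unfold contador
    rw [show ((0 : Nat) : Int) + 1 = 0 + 1 by norm_num,
        PySem.List.pyRange_one_succ_right (by norm_num), PySem.List.pyRange_one_eq_nil le_rfl]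
    simp only [List.nil_append, List.foldl_cons, List.foldl_nil]
    rw [PySem.List.pyRange_one_eq_nil le_rfl]
    simpa [pvF, pvC, pvE] using desarregloA_eq 0
  | succ m ih =>
    unfold contador
    rw [show ((m + 1 : Nat) : Int) + 1 = ((m : Int) + 1) + 1 by push_cast; ring,
        PySem.List.pyRange_one_succ_right (by omega), List.foldl_append]
    unfold contador at ih
    rw [show ((m : Nat) : Int) + 1 = (m : Int) + 1 from rfl] at ih
    simp only [List.foldl_cons, List.foldl_nil]
    rw [ih]
    have hc : ((m : Int) + 1) = ((m + 1 : Nat) : Int) := by push_cast; ring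
    rw [hc, combA_eq n (m + 1), desarregloA_eq (m + 1)]
    rfl

theorem contadorB_loop (n : Int) (j : Nat) :
    (PySem.List.pyRange 1 ((j : Int) + 1) 1).foldl
      (fun (s : Int × Int × Int × Int) d =>
        let comb := PySem.Int.floordiv (s.2.1 * (n - d + 1)) d
        let sign := -s.2.2.2
        let der := d * s.2.2.1 + sign
        (s.1 + comb * der, comb, der, sign)) (1, 1, 1, 1)
      = (pvF n j, pvC n j, pvE j, (-1) ^ j) := by
  induction j with
  | zero => simp [PySem.List.pyRange_one_eq_nil, pvF, pvC, pvE]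
  | succ m ih =>
    rw [show ((m + 1 : Nat) : Int) + 1 = ((m : Int) + 1) + 1 by push_cast; ring,
        PySem.List.pyRange_one_succ_right (by omega), List.foldl_append, ih]
    simp only [List.foldl_cons, List.foldl_nil]
    have hcomb : PySem.Int.floordiv (pvC n m * (n - ((m : Int) + 1) + 1)) ((m : Int) + 1)
        = pvC n (m + 1) := by
      rw [show n - ((m : Int) + 1) + 1 = n - (m : Int) by ring]
      simp [pvC]
    have hsign : -((-1 : Int) ^ m) = (-1) ^ (m + 1) := by rw [pow_succ]; ring
    have hder : ((m : Int) + 1) * pvE m + (-1) ^ (m + 1) = pvE (m + 1) := by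
      simp [pvE]
    refine Prod.ext ?_ (Prod.ext ?_ (Prod.ext ?_ ?_)) <;>
      simp only [hsign, hcomb, hder, pvF]

theorem contador_eq_alt (n k : Int) : contador n k = contador_alt n k := by
  by_cases hk : k < 0
  · unfold contador contador_alt
    rw [PySem.List.pyRange_one_eq_nil (by omega), if_pos hk]
    rfl
  · obtain ⟨j, rfl⟩ : ∃ j : Nat, (j : Int) = k :=
      ⟨k.toNat, Int.toNat_of_nonneg (Int.not_lt.mp hk)⟩
    rw [contadorA_eq n j]
    unfold contador_alt
    rw [if_neg (by omega), contadorB_loop n j]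

-- ===== VERDICT (by name: the statement is the Claim_ definition above) =====
theorem contador_spec : Claim_equal_contador := by
  intro n k _
  unfold Spec_contador
  exact contador_eq_alt n k
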